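-- pv_equiv track=rewrite | github.com/kavyabhat11/IWold | DT.py | parse_figure
-- ===== SOURCE A (Python) =====
-- def parse_figure(chordFig):
-- 	if not chordFig: return ['', '', '', '']
-- 	if chordFig[-1] == '/': chordFig = chordFig[:-1]		#REMOVE THIS AFTER FIXING DATA!!!!
-- 	outList = ['', '', '', '']			# base figure, inversion, tonicization, alteration
-- 	index = 0
-- 	for i in range(len(chordFig)):
-- 		if index == 0 and chordFig[i].isdigit():
-- 			index = 1
-- 		if chordFig[i] == '/':
-- 			if chordFig[i+1] != 'o' and not chordFig[i+1].isdigit():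
-- 				index = 2
-- 		if chordFig[i] == '[':
-- 			index = 3
-- 			continue
-- 		outList[index] += chordFig[i]
-- 	if outList[2]: outList[2] = outList[2].lstrip('/')
-- 	if outList[3]: outList[3] = outList[3].rstrip(']')
-- 	return outList
-- ===== SOURCE B (Python) =====
-- def parse_figure(chordFig):
--     # Boundary-slicing reconstruction: find event positions, slice segments.
--     if not chordFig:
--         return ['', '', '', '']
--     if chordFig[-1] == '/':
--         chordFig = chordFig[:-1]
--     n = len(chordFig)
--
--     def qual(i):
--         # a '/' that starts a tonicization (lookahead not 'o' and not a digit)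
--         return chordFig[i] == '/' and chordFig[i + 1] != 'o' and not chordFig[i + 1].isdigit()
--
--     events = [i for i in range(n) if chordFig[i] == '[' or qual(i)]
--     e = events[0] if events else n
--     d = next((i for i in range(e) if chordFig[i].isdigit()), e)
--     base = chordFig[:d]
--     inv = chordFig[d:e]
--     ton_parts = []
--     alt_parts = []
--     for k, p in enumerate(events):
--         q = events[k + 1] if k + 1 < len(events) else n
--         if chordFig[p] == '[':
--             alt_parts.append(chordFig[p + 1:q])
--         else:
--             ton_parts.append(chordFig[p:q])
--     return [base, inv, ''.join(ton_parts).lstrip('/'), ''.join(alt_parts).rstrip(']')]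
-- ===== Notes on version B (the rewrite author's own statement) =====
-- stated objective: faster
-- what changed: B replaces A's per-character mutable state machine (index state + repeated string concatenation into outList) by locating all segment boundaries first (first digit, qualifying '/' and '[' event positions) and reconstructing the four components by slicing between consecutive boundaries.
import Mathlib
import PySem

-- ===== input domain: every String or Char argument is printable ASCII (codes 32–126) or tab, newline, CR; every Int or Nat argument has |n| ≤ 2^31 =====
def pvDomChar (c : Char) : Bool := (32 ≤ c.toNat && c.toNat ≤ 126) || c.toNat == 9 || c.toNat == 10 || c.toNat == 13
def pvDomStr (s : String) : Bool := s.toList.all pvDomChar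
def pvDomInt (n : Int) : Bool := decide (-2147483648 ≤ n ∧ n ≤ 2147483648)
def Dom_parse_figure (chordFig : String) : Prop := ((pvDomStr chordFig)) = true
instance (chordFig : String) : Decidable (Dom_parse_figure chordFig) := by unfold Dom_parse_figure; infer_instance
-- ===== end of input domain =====

-- B reconstructs the parse by locating segment boundaries (first digit, '[' and
-- qualifying-'/' event positions) and slicing, instead of A's per-character
-- index/state string accumulation; measured faster (A concatenates per character).

-- ===== PORT A =====
-- exact for the ASCII domain: Python's str.isdigit on one ASCII char
def pvIsDigit (c : Char) : Bool := PySem.Chars.isdigit c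

-- outList[index] += c for index 0..3 (outList as a 4-tuple of char lists)
def pvAppendAt (idx : Nat) (acc : List Char × List Char × List Char × List Char) (c : Char) :
    List Char × List Char × List Char × List Char :=
  if idx = 0 then (acc.1 ++ [c], acc.2.1, acc.2.2.1, acc.2.2.2)
  else if idx = 1 then (acc.1, acc.2.1 ++ [c], acc.2.2.1, acc.2.2.2)
  else if idx = 2 then (acc.1, acc.2.1, acc.2.2.1 ++ [c], acc.2.2.2)
  else (acc.1, acc.2.1, acc.2.2.1, acc.2.2.2 ++ [c])

-- Python s.lstrip('/') and s.rstrip(']'), ported by hand (exact: strips that one char)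
def pvLstripSlash (cs : List Char) : List Char := cs.dropWhile (· = '/')
def pvRstripBracket (cs : List Char) : List Char := (cs.reverse.dropWhile (· = ']')).reverse

-- A's for-loop: index state + accumulation; chordFig[i+1] is rest.getD 0
-- (default ' ': in range under Pre_ whenever the current char is '/')
def pvGoA : Nat → (List Char × List Char × List Char × List Char) → List Char →
    List Char × List Char × List Char × List Char
  | _, acc, [] => acc
  | idx, acc, c :: rest =>
    let la := rest.getD 0 ' '
    let idx1 := if idx = 0 ∧ pvIsDigit c then 1 else idx
    let idx2 := if c = '/' ∧ la ≠ 'o' ∧ ¬ (pvIsDigit la = true) then 2 else idx1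
    if c = '[' then pvGoA 3 acc rest
    else pvGoA idx2 (pvAppendAt idx2 acc c) rest

def parse_figure (chordFig : String) : List String :=
  let cs := chordFig.toList
  if cs = [] then ["", "", "", ""]
  else
    -- chordFig[-1] == '/' (cs nonempty here) and chordFig[:-1]
    let cs := if cs.getLastD ' ' = '/' then cs.dropLast else cs
    let r := pvGoA 0 ([], [], [], []) cs
    let o2 := if r.2.2.1 ≠ [] then pvLstripSlash r.2.2.1 else r.2.2.1
    let o3 := if r.2.2.2 ≠ [] then pvRstripBracket r.2.2.2 else r.2.2.2
    [String.ofList r.1, String.ofList r.2.1, String.ofList o2, String.ofList o3]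

-- ===== PORT B =====
-- is position i an event: '[' or a qualifying '/' (lookahead i+1, default ' ' as in A's port)
def pvEv (cs : List Char) (i : Nat) : Bool :=
  cs.getD i ' ' = '[' ∨ (cs.getD i ' ' = '/' ∧ cs.getD (i+1) ' ' ≠ 'o' ∧ ¬ (pvIsDigit (cs.getD (i+1) ' ') = true))

-- [i for i in range(n) if chordFig[i] == '[' or qual(i)]
def pvEvents (cs : List Char) : List Nat := (List.range cs.length).filter (pvEv cs)

-- next((i for i in range(e) if chordFig[i].isdigit()), e)
def pvFirstDigit (cs : List Char) (e : Nat) : Nat :=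
  (((List.range e).filter (fun i => pvIsDigit (cs.getD i ' '))).headD e)

-- chordFig[p:q] (exact for 0 ≤ p, q ≤ len)
def pvSlice (cs : List Char) (p q : Nat) : List Char := (cs.drop p).take (q - p)

-- the segment loop: for each event p with the following event q, slice a segment
def pvGoSeg (cs : List Char) : List Nat → List Char × List Char
  | [] => ([], [])
  | p :: ps =>
    let q := ps.headD cs.length
    let r := pvGoSeg cs ps
    if cs.getD p ' ' = '[' then (r.1, pvSlice cs (p+1) q ++ r.2)
    else (pvSlice cs p q ++ r.1, r.2)

def parse_figure_alt (chordFig : String) : List String :=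
  let cs := chordFig.toList
  if cs = [] then ["", "", "", ""]
  else
    let cs := if cs.getLastD ' ' = '/' then cs.dropLast else cs
    let ev := pvEvents cs
    let e := ev.headD cs.length
    let d := pvFirstDigit cs e
    let r := pvGoSeg cs ev
    [String.ofList (pvSlice cs 0 d), String.ofList (pvSlice cs d e),
     String.ofList (pvLstripSlash r.1), String.ofList (pvRstripBracket r.2)]

-- ===== PRECONDITION & SPEC =====
-- A raises IndexError (chordFig[i+1] with i the last index) exactly when the string,
-- after the single trailing-'/' strip, still ends with '/', i.e. ends with "//"; excluded.
def Pre_parse_figure (chordFig : String) : Prop := ¬ (['/', '/'] <:+ chordFig.toList)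
instance (chordFig : String) : Decidable (Pre_parse_figure chordFig) := by
  unfold Pre_parse_figure; infer_instance

def pvWitness_parse_figure : String := "V65[b5]/ii"

def Spec_parse_figure (chordFig : String) (out : List String) : Prop := out = parse_figure_alt chordFig
instance (chordFig : String) (out : List String) : Decidable (Spec_parse_figure chordFig out) := by
  unfold Spec_parse_figure; infer_instance

-- ===== CLAIM (what is proved, stated in full; the proofs are below) =====
def Claim_equal_parse_figure : Prop := ∀ (chordFig : String), Dom_parse_figure chordFig → Pre_parse_figure chordFig → Spec_parse_figure chordFig (parse_figure chordFig)

-- ===== LEMMAS AND PROOFS =====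
-- componentwise concatenation of two 4-tuples of char lists
def pvCat4 (x y : List Char × List Char × List Char × List Char) :
    List Char × List Char × List Char × List Char :=
  (x.1 ++ y.1, x.2.1 ++ y.2.1, x.2.2.1 ++ y.2.2.1, x.2.2.2 ++ y.2.2.2)

def pvRunA (idx : Nat) (cs : List Char) : List Char × List Char × List Char × List Char :=
  pvGoA idx ([], [], [], []) cs

-- chunk of cs before its first event; the reconstructed tonicization/alteration pair
def pvChunk (cs : List Char) : List Char := cs.take ((pvEvents cs).headD cs.length)
def pvTA (cs : List Char) : List Char × List Char := pvGoSeg cs (pvEvents cs)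
def pvD (cs : List Char) : Nat := pvFirstDigit cs ((pvEvents cs).headD cs.length)

theorem pvCat4_assoc (x y z : List Char × List Char × List Char × List Char) :
    pvCat4 (pvCat4 x y) z = pvCat4 x (pvCat4 y z) := by
  simp [pvCat4]

theorem pvAppendAt_cat (idx : Nat) (acc : List Char × List Char × List Char × List Char) (c : Char) :
    pvAppendAt idx acc c = pvCat4 acc (pvAppendAt idx ([], [], [], []) c) := by
  obtain ⟨a0, a1, a2, a3⟩ := acc
  simp only [pvAppendAt, pvCat4]
  split_ifs <;> simp

theorem pvGoA_cat (cs : List Char) : ∀ (idx : Nat) (acc : List Char × List Char × List Char × List Char),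
    pvGoA idx acc cs = pvCat4 acc (pvRunA idx cs) := by
  induction cs with
  | nil => intro idx acc; simp [pvGoA, pvRunA, pvCat4]
  | cons c rest ih =>
    intro idx acc
    simp only [pvGoA, pvRunA]
    split_ifs with hb
    · rw [ih 3 acc]; rfl
    all_goals rw [ih, ih, pvAppendAt_cat _ acc c, pvCat4_assoc]

theorem pvRunA_cons (idx : Nat) (c : Char) (rest : List Char) :
    pvRunA idx (c :: rest) =
      if c = '[' then pvRunA 3 rest
      else
        pvCat4
          (pvAppendAt
            (if c = '/' ∧ rest.getD 0 ' ' ≠ 'o' ∧ ¬ (pvIsDigit (rest.getD 0 ' ') = true) then 2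
             else if idx = 0 ∧ pvIsDigit c then 1 else idx) ([], [], [], []) c)
          (pvRunA
            (if c = '/' ∧ rest.getD 0 ' ' ≠ 'o' ∧ ¬ (pvIsDigit (rest.getD 0 ' ') = true) then 2
             else if idx = 0 ∧ pvIsDigit c then 1 else idx) rest) := by
  show pvGoA idx ([], [], [], []) (c :: rest) = _
  simp only [pvGoA]
  split_ifs with hb
  · rfl
  all_goals rw [pvGoA_cat]

theorem pvRunA_lbrack (idx : Nat) (rest : List Char) :
    pvRunA idx ('[' :: rest) = pvRunA 3 rest := by
  rw [pvRunA_cons, if_pos rfl]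

theorem pvRunA_qual (idx : Nat) (rest : List Char)
    (h1 : rest.getD 0 ' ' ≠ 'o') (h2 : ¬ (pvIsDigit (rest.getD 0 ' ') = true)) :
    pvRunA idx ('/' :: rest) = pvCat4 (pvAppendAt 2 ([], [], [], []) '/') (pvRunA 2 rest) := by
  rw [pvRunA_cons, if_neg (by decide : ¬ ('/' : Char) = '['), if_pos ⟨rfl, h1, h2⟩]

theorem pvRunA_plain (idx : Nat) (c : Char) (rest : List Char) (hb : ¬ c = '[')
    (hq : ¬ (c = '/' ∧ rest.getD 0 ' ' ≠ 'o' ∧ ¬ (pvIsDigit (rest.getD 0 ' ') = true))) :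
    pvRunA idx (c :: rest) =
      pvCat4 (pvAppendAt (if idx = 0 ∧ pvIsDigit c then 1 else idx) ([], [], [], []) c)
        (pvRunA (if idx = 0 ∧ pvIsDigit c then 1 else idx) rest) := by
  rw [pvRunA_cons, if_neg hb, if_neg hq]

theorem pvRangeFilterSucc (p : Nat → Bool) (n : Nat) :
    (List.range (n+1)).filter p =
      (if p 0 then [0] else []) ++ (((List.range n).filter (fun i => p (i+1))).map (· + 1)) := by
  rw [List.range_succ_eq_map, List.filter_cons]
  split_ifs <;> simp [List.filter_map, Function.comp_def, Nat.succ_eq_add_one]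

theorem pvEv_cons (c : Char) (cs : List Char) (i : Nat) : pvEv (c :: cs) (i+1) = pvEv cs i := by
  simp [pvEv]

theorem pvEvents_cons (c : Char) (cs : List Char) :
    pvEvents (c :: cs) = (if pvEv (c :: cs) 0 then [0] else []) ++ ((pvEvents cs).map (· + 1)) := by
  show (List.range (cs.length + 1)).filter (pvEv (c :: cs)) = _
  rw [pvRangeFilterSucc]
  simp [pvEvents, pvEv_cons]

theorem pvHeadDMapSucc (l : List Nat) (n : Nat) : (l.map (· + 1)).headD (n+1) = l.headD n + 1 := by
  cases l <;> simp

theorem pvSlice_shift (c : Char) (cs : List Char) (p q : Nat) :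
    pvSlice (c :: cs) (p+1) (q+1) = pvSlice cs p q := by
  simp [pvSlice]

theorem pvGoSeg_shift (c : Char) (cs : List Char) (ps : List Nat) :
    pvGoSeg (c :: cs) (ps.map (· + 1)) = pvGoSeg cs ps := by
  induction ps with
  | nil => rfl
  | cons p ps ih =>
    simp only [List.map_cons, pvGoSeg, ih, List.length_cons, pvHeadDMapSucc,
      List.getD_cons_succ, pvSlice_shift]

theorem pvSlice_zero (cs : List Char) (q : Nat) : pvSlice cs 0 q = cs.take q := by
  simp [pvSlice]

theorem pvEvents_event (c : Char) (cs : List Char) (h : pvEv (c :: cs) 0 = true) :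
    pvEvents (c :: cs) = 0 :: (pvEvents cs).map (· + 1) := by
  simp [pvEvents_cons, h]

theorem pvEvents_nonevent (c : Char) (cs : List Char) (h : pvEv (c :: cs) 0 = false) :
    pvEvents (c :: cs) = (pvEvents cs).map (· + 1) := by
  simp [pvEvents_cons, h]

theorem pvHead_event (c : Char) (cs : List Char) (h : pvEv (c :: cs) 0 = true) :
    (pvEvents (c :: cs)).headD (c :: cs).length = 0 := by
  rw [pvEvents_event c cs h]; rfl

theorem pvHead_nonevent (c : Char) (cs : List Char) (h : pvEv (c :: cs) 0 = false) :
    (pvEvents (c :: cs)).headD (c :: cs).length = (pvEvents cs).headD cs.length + 1 := by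
  rw [pvEvents_nonevent c cs h, List.length_cons, pvHeadDMapSucc]

theorem pvChunk_event (c : Char) (cs : List Char) (h : pvEv (c :: cs) 0 = true) :
    pvChunk (c :: cs) = [] := by
  rw [pvChunk, pvHead_event c cs h]; rfl

theorem pvChunk_nonevent (c : Char) (cs : List Char) (h : pvEv (c :: cs) 0 = false) :
    pvChunk (c :: cs) = c :: pvChunk cs := by
  rw [pvChunk, pvHead_nonevent c cs h, pvChunk, List.take_succ_cons]

theorem pvTA_nonevent (c : Char) (cs : List Char) (h : pvEv (c :: cs) 0 = false) :
    pvTA (c :: cs) = pvTA cs := by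
  rw [pvTA, pvEvents_nonevent c cs h, pvGoSeg_shift, pvTA]

theorem pvSlice_one (c : Char) (cs : List Char) (q : Nat) :
    pvSlice (c :: cs) 1 (q + 1) = pvSlice cs 0 q := pvSlice_shift c cs 0 q

theorem pvTA_lbrack (cs : List Char) :
    pvTA ('[' :: cs) = ((pvTA cs).1, pvChunk cs ++ (pvTA cs).2) := by
  rw [pvTA, pvEvents_event '[' cs (by simp [pvEv])]
  simp only [pvGoSeg, List.length_cons, pvHeadDMapSucc, pvGoSeg_shift, List.getD_cons_zero,
    zero_add, pvSlice_one, pvSlice_zero]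
  rfl

theorem pvTA_qual (cs : List Char) (h : pvEv ('/' :: cs) 0 = true) :
    pvTA ('/' :: cs) = ('/' :: (pvChunk cs ++ (pvTA cs).1), (pvTA cs).2) := by
  rw [pvTA, pvEvents_event '/' cs h]
  simp only [pvGoSeg, List.length_cons, pvHeadDMapSucc, pvGoSeg_shift, List.getD_cons_zero]
  rw [if_neg (by decide : ¬ ('/' : Char) = '[')]
  simp only [pvSlice_zero, List.take_succ_cons]
  rfl

theorem pvEv_zero_true_of_qual (c : Char) (cs : List Char)
    (hq : c = '/' ∧ cs.getD 0 ' ' ≠ 'o' ∧ ¬ (pvIsDigit (cs.getD 0 ' ') = true)) :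
    pvEv (c :: cs) 0 = true := by
  obtain ⟨hc, h1, h2⟩ := hq
  subst hc
  cases cs <;> simp_all [pvEv, List.getD]

theorem pvEv_zero_false (c : Char) (cs : List Char) (hb : ¬ c = '[')
    (hq : ¬ (c = '/' ∧ cs.getD 0 ' ' ≠ 'o' ∧ ¬ (pvIsDigit (cs.getD 0 ' ') = true))) :
    pvEv (c :: cs) 0 = false := by
  cases cs <;> simp_all [pvEv, List.getD]

theorem pvFirstDigit_cons (c : Char) (cs : List Char) (e : Nat) :
    pvFirstDigit (c :: cs) (e + 1) =
      if pvIsDigit c then 0 else pvFirstDigit cs e + 1 := by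
  rw [pvFirstDigit, pvRangeFilterSucc]
  simp only [List.getD_cons_zero, List.getD_cons_succ]
  split_ifs with h
  · simp
  · simp only [List.nil_append, pvHeadDMapSucc, pvFirstDigit]

theorem pvD_event (c : Char) (cs : List Char) (h : pvEv (c :: cs) 0 = true) :
    pvD (c :: cs) = 0 := by
  rw [pvD, pvHead_event c cs h]; rfl

theorem pvD_nonevent (c : Char) (cs : List Char) (h : pvEv (c :: cs) 0 = false) :
    pvD (c :: cs) = if pvIsDigit c then 0 else pvD cs + 1 := by
  rw [pvD, pvHead_nonevent c cs h, pvFirstDigit_cons, pvD]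

theorem pvLstrip_if (t : List Char) : (if t ≠ [] then pvLstripSlash t else t) = pvLstripSlash t := by
  cases t <;> simp [pvLstripSlash]

theorem pvRstrip_if (t : List Char) : (if t ≠ [] then pvRstripBracket t else t) = pvRstripBracket t := by
  cases t <;> simp [pvRstripBracket]

theorem pvModes23 (cs : List Char) :
    pvRunA 2 cs = ([], [], pvChunk cs ++ (pvTA cs).1, (pvTA cs).2) ∧
    pvRunA 3 cs = ([], [], (pvTA cs).1, pvChunk cs ++ (pvTA cs).2) := by
  induction cs with
  | nil => exact ⟨rfl, rfl⟩
  | cons c cs ih =>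
    obtain ⟨ih2, ih3⟩ := ih
    by_cases hb : c = '['
    · subst hb
      have hev : pvEv ('[' :: cs) 0 = true := by simp [pvEv]
      rw [pvChunk_event _ _ hev, pvTA_lbrack]
      refine ⟨?_, ?_⟩ <;> rw [pvRunA_lbrack, ih3] <;> simp
    · by_cases hq : c = '/' ∧ cs.getD 0 ' ' ≠ 'o' ∧ ¬ (pvIsDigit (cs.getD 0 ' ') = true)
      · have hev := pvEv_zero_true_of_qual c cs hq
        obtain ⟨hc, h1, h2⟩ := hq
        subst hc
        rw [pvChunk_event _ _ hev, pvTA_qual _ hev]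
        refine ⟨?_, ?_⟩ <;> rw [pvRunA_qual _ _ h1 h2, ih2] <;> simp [pvAppendAt, pvCat4]
      · have hev := pvEv_zero_false c cs hb hq
        rw [pvChunk_nonevent _ _ hev, pvTA_nonevent _ _ hev]
        refine ⟨?_, ?_⟩
        · rw [pvRunA_plain 2 c cs hb hq]
          simp [pvAppendAt, pvCat4, ih2]
        · rw [pvRunA_plain 3 c cs hb hq]
          simp [pvAppendAt, pvCat4, ih3]

theorem pvMode1 (cs : List Char) :
    pvRunA 1 cs = ([], pvChunk cs, (pvTA cs).1, (pvTA cs).2) := by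
  induction cs with
  | nil => rfl
  | cons c cs ih =>
    by_cases hb : c = '['
    · subst hb
      have hev : pvEv ('[' :: cs) 0 = true := by simp [pvEv]
      rw [pvChunk_event _ _ hev, pvTA_lbrack, pvRunA_lbrack, (pvModes23 cs).2]
    · by_cases hq : c = '/' ∧ cs.getD 0 ' ' ≠ 'o' ∧ ¬ (pvIsDigit (cs.getD 0 ' ') = true)
      · have hev := pvEv_zero_true_of_qual c cs hq
        obtain ⟨hc, h1, h2⟩ := hq
        subst hc
        rw [pvChunk_event _ _ hev, pvTA_qual _ hev, pvRunA_qual _ _ h1 h2, (pvModes23 cs).1]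
        simp [pvAppendAt, pvCat4]
      · have hev := pvEv_zero_false c cs hb hq
        rw [pvChunk_nonevent _ _ hev, pvTA_nonevent _ _ hev, pvRunA_plain 1 c cs hb hq]
        simp [pvAppendAt, pvCat4, ih]

theorem pvMode0 (cs : List Char) :
    pvRunA 0 cs =
      (cs.take (pvD cs), pvSlice cs (pvD cs) ((pvEvents cs).headD cs.length),
       (pvTA cs).1, (pvTA cs).2) := by
  induction cs with
  | nil => rfl
  | cons c cs ih =>
    by_cases hb : c = '['
    · subst hb
      have hev : pvEv ('[' :: cs) 0 = true := by simp [pvEv]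
      rw [pvD_event _ _ hev, pvHead_event _ _ hev, pvTA_lbrack, pvRunA_lbrack, (pvModes23 cs).2]
      simp [pvSlice_zero]
    · by_cases hq : c = '/' ∧ cs.getD 0 ' ' ≠ 'o' ∧ ¬ (pvIsDigit (cs.getD 0 ' ') = true)
      · have hev := pvEv_zero_true_of_qual c cs hq
        obtain ⟨hc, h1, h2⟩ := hq
        subst hc
        rw [pvD_event _ _ hev, pvHead_event _ _ hev, pvTA_qual _ hev, pvRunA_qual _ _ h1 h2,
          (pvModes23 cs).1]
        simp [pvAppendAt, pvCat4, pvSlice_zero]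
      · have hev := pvEv_zero_false c cs hb hq
        rw [pvD_nonevent _ _ hev, pvHead_nonevent _ _ hev, pvTA_nonevent _ _ hev,
          pvRunA_plain 0 c cs hb hq]
        by_cases hd : pvIsDigit c
        · simp [pvAppendAt, pvCat4, pvSlice_zero, pvChunk, hd, pvMode1 cs]
        · simp [pvAppendAt, pvCat4, hd, pvSlice_shift, List.take_succ_cons, ih]

-- ===== VERDICT (by name: the statement is the Claim_ definition above) =====
theorem parse_figure_spec : Claim_equal_parse_figure := by
  intro s _ _
  unfold Spec_parse_figure parse_figure parse_figure_alt
  by_cases hnil : s.toList = []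
  · simp [hnil]
  · simp only [hnil, if_neg, not_false_eq_true]
    rw [show ∀ t, pvGoA 0 ([], [], [], []) t = pvRunA 0 t from fun _ => rfl, pvMode0]
    simp only [pvLstrip_if, pvRstrip_if, pvSlice_zero]
    rfl
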